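-- pv_equiv track=rewrite | github.com/seungh1024/algorithm | 프로그래머스/level1/[1차]비밀지도.py | solution
-- ===== SOURCE A (Python) =====
-- def solution(n, arr1, arr2):
--     answer = []
--
--     for i in range(n):
--         x = ''
--         a = arr1[i]
--         b = arr2[i]
--         for j in range(n):
--             if ((a%2) or (b%2)):
--                 x = '#' + x
--             else:
--                 x = ' ' + x
--             a = a//2
--             b = b//2
--         answer.append(x)
--
--
--     return answer
-- ===== SOURCE B (Python) =====
-- def solution(n, arr1, arr2):
--     if n <= 0:
--         return []
--     m = 1 << n
--
--     def render(x):
--         # one wall row: zero-padded binary of x mod 2**n, '1' -> '#', '0' -> ' '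
--         return ''.join('#' if ch == '1' else ' ' for ch in format(x % m, 'b').zfill(n))
--
--     # render each array's map separately, then overlay them character-wise
--     # ('#' (35) beats ' ' (32) under max)
--     return [''.join(map(max, render(a), render(b)))
--             for a, b in zip(arr1[:n], arr2[:n])]
-- ===== Notes on version B (the rewrite author's own statement) =====
-- stated objective: alternative
-- what changed: Instead of A's per-bit halving loop that builds each row by repeatedly prepending one character, B renders each array row as a zero-padded binary string via format(x % 2**n, 'b').zfill(n) (translated to #/space) and overlays the two rendered maps character-wise with max.
import Mathlib
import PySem

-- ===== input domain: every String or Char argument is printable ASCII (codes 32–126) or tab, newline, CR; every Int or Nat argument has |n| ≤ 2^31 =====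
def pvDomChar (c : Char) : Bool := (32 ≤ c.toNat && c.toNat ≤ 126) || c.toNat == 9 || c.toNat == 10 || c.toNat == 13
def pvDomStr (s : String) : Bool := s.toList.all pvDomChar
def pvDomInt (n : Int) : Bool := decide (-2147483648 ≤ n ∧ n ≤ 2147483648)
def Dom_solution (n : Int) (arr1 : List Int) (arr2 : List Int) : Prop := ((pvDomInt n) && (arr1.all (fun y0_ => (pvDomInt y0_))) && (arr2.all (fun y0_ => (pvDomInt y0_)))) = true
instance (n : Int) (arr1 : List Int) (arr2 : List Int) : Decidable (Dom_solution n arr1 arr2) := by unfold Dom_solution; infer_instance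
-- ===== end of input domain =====

-- B replaces A's per-bit halving loop (which prepends one character per bit) by rendering each
-- array row as a zero-padded binary string (format(x % 2**n,'b').zfill(n)) and overlaying the
-- two rendered maps character-wise with max; return-value equivalence proved on Pre_ (n within
-- both list lengths).


-- ===== PORT A =====
-- inner loop `for j in range(n)`: state (a, b, x); x grows by prepending '#' or ' '
def rowA : Int → Int → Nat → String → String
  | _, _, 0, x => x
  | a, b, k+1, x =>
      rowA (PySem.Int.floordiv a 2) (PySem.Int.floordiv b 2) k
        ((if PySem.Int.mod a 2 ≠ 0 ∨ PySem.Int.mod b 2 ≠ 0 then "#" else " ") ++ x)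

-- outer loop `for i in range(n)` appending rows; arr1[i]/arr2[i] raise IndexError when
-- i ≥ length — Pre_solution excludes exactly those inputs, so the `.getD 0` is never taken.
def solution (n : Int) (arr1 : List Int) (arr2 : List Int) : List String :=
  (PySem.List.pyRange 0 n).foldl
    (fun answer i =>
      answer ++ [rowA ((PySem.List.pyGet? arr1 i).getD 0)
                      ((PySem.List.pyGet? arr2 i).getD 0) n.toNat ""]) []

-- ===== PORT B =====
-- Python's max(p, q) on the two 1-character strings map(max, …, …) yields: q iff q > p;
-- single-character ASCII strings compare by code point, so Char order is exact here.
def pymax (p q : Char) : Char := if p < q then q else p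

-- render(x) = ''.join('#' if ch == '1' else ' ' for ch in format(x % m, 'b').zfill(n))
def renderB (m w x : Int) : List Char :=
  (PySem.Chars.zfill (PySem.Int.toBinChars (PySem.Int.mod x m)) w).map
    (fun ch => if ch = '1' then '#' else ' ')

-- [''.join(map(max, render(a), render(b))) for a, b in zip(arr1[:n], arr2[:n])]
def solution_alt (n : Int) (arr1 : List Int) (arr2 : List Int) : List String :=
  if n ≤ 0 then []
  else
    let m : Int := (1 : Int) <<< n.toNat
    (List.zip (PySem.List.slice arr1 none (some n)) (PySem.List.slice arr2 none (some n))).map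
      (fun p => String.ofList (List.zipWith pymax (renderB m n p.1) (renderB m n p.2)))

-- ===== PRECONDITION & SPEC =====
-- A indexes arr1[i], arr2[i] for every i < n and raises IndexError when either list is
-- shorter than n; Pre_ excludes exactly those inputs (it is vacuous for n ≤ 0).
def Pre_solution (n : Int) (arr1 : List Int) (arr2 : List Int) : Prop :=
  n ≤ (arr1.length : Int) ∧ n ≤ (arr2.length : Int)
instance (n : Int) (arr1 : List Int) (arr2 : List Int) : Decidable (Pre_solution n arr1 arr2) := by
  unfold Pre_solution; infer_instance

def pvWitness_solution : Int × List Int × List Int := (2, ([1, 2], [2, 3]))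

def Spec_solution (n : Int) (arr1 : List Int) (arr2 : List Int) (out : List String) : Prop := out = solution_alt n arr1 arr2
instance (n : Int) (arr1 : List Int) (arr2 : List Int) (out : List String) : Decidable (Spec_solution n arr1 arr2 out) := by unfold Spec_solution; infer_instance

-- ===== CLAIM (what is proved, stated in full; the proofs are below) =====
def Claim_equal_solution : Prop := ∀ (n : Int) (arr1 : List Int) (arr2 : List Int), Dom_solution n arr1 arr2 → Pre_solution n arr1 arr2 → Spec_solution n arr1 arr2 (solution n arr1 arr2)

-- ===== LEMMAS AND PROOFS =====

-- the character A emits for bit k (proof-side characterisation of rowA's loop state)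
def bitChar (a b : Int) (k : Nat) : Char :=
  if PySem.Int.band (PySem.Int.floordiv a (2 ^ k)) 1 ≠ 0 ∨
     PySem.Int.band (PySem.Int.floordiv b (2 ^ k)) 1 ≠ 0 then '#' else ' '

lemma floordiv_floordiv_two (a : Int) (k : Nat) :
    PySem.Int.floordiv (PySem.Int.floordiv a 2) (2 ^ k) = PySem.Int.floordiv a (2 ^ (k + 1)) := by
  rw [PySem.Int.floordiv_eq_ediv_of_pos (by norm_num),
      PySem.Int.floordiv_eq_ediv_of_pos (by positivity),
      PySem.Int.floordiv_eq_ediv_of_pos (by positivity),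
      Int.ediv_ediv_of_nonneg (by norm_num), pow_succ, mul_comm]

lemma bitChar_succ (a b : Int) (k : Nat) :
    bitChar a b (k + 1)
      = bitChar (PySem.Int.floordiv a 2) (PySem.Int.floordiv b 2) k := by
  unfold bitChar
  rw [floordiv_floordiv_two a k, floordiv_floordiv_two b k]

lemma bitChar_zero (a b : Int) :
    bitChar a b 0 = if PySem.Int.mod a 2 ≠ 0 ∨ PySem.Int.mod b 2 ≠ 0 then '#' else ' ' := by
  unfold bitChar
  norm_num [PySem.Int.band_one,
    PySem.Int.floordiv_eq_ediv_of_pos (show (0:Int) < 1 by norm_num)]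

lemma rowA_eq (k : Nat) (a b : Int) (cs : List Char) :
    rowA a b k (String.ofList cs)
      = String.ofList (((List.range k).reverse).map (bitChar a b) ++ cs) := by
  induction k generalizing a b cs with
  | zero => simp [rowA]
  | succ k ih =>
    have hif : (if PySem.Int.mod a 2 ≠ 0 ∨ PySem.Int.mod b 2 ≠ 0 then "#" else " ")
        ++ String.ofList cs
        = String.ofList (bitChar a b 0 :: cs) := by
      rw [bitChar_zero]; split_ifs
      · rw [show ('#' : Char) :: cs = ['#'] ++ cs from rfl, String.ofList_append]
      · rw [show (' ' : Char) :: cs = [' '] ++ cs from rfl, String.ofList_append]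
    rw [rowA, hif, ih]
    congr 1
    have hsucc : bitChar a b ∘ Nat.succ
        = bitChar (PySem.Int.floordiv a 2) (PySem.Int.floordiv b 2) :=
      funext fun j => bitChar_succ a b j
    rw [List.range_succ_eq_map]
    simp only [List.reverse_cons, List.map_append, ← List.map_reverse, List.map_map, hsucc]
    simp

-- proof-side characterisation of Nat.toDigits 2 (what format(·,'b') produces)
def binC (m : Nat) : List Char :=
  if m / 2 = 0 then [Nat.digitChar (m % 2)] else binC (m / 2) ++ [Nat.digitChar (m % 2)]
termination_by m
decreasing_by omega

lemma toDigitsCore_eq_binC :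
    ∀ (f m : Nat) (l : List Char), m < f → Nat.toDigitsCore 2 f m l = binC m ++ l := by
  intro f
  induction f with
  | zero => intro m l hm; omega
  | succ f ih =>
    intro m l hm
    rw [Nat.toDigitsCore, binC]
    by_cases h : m / 2 = 0
    · simp [h]
    · simp only [h, if_false]
      rw [ih (m / 2) _ (by omega), List.append_assoc]
      rfl

lemma toDigits_two_eq_binC (m : Nat) : Nat.toDigits 2 m = binC m := by
  rw [Nat.toDigits, toDigitsCore_eq_binC (m + 1) m [] (by omega), List.append_nil]

lemma binC_chars (m : Nat) : ∀ c ∈ binC m, c = '0' ∨ c = '1' := by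
  induction m using Nat.strong_induction_on with
  | _ m ih =>
    intro c hc
    rw [binC] at hc
    have hm2 : m % 2 = 0 ∨ m % 2 = 1 := by omega
    by_cases h : m / 2 = 0
    · simp only [h, if_true, List.mem_singleton] at hc
      rcases hm2 with h2 | h2 <;> simp [hc, h2, Nat.digitChar]
    · simp only [h, if_false, List.mem_append, List.mem_singleton] at hc
      rcases hc with hc | hc
      · exact ih (m / 2) (by omega) c hc
      · rcases hm2 with h2 | h2 <;> simp [hc, h2, Nat.digitChar]

lemma binC_ne_nil (m : Nat) : binC m ≠ [] := by
  rw [binC]; split_ifs <;> simp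

lemma binC_length_le : ∀ (e m : Nat), m < 2 ^ e → 0 < e → (binC m).length ≤ e := by
  intro e
  induction e with
  | zero => omega
  | succ e ih =>
    intro m hm _
    rw [binC]
    by_cases h : m / 2 = 0
    · simp [h]
    · have hlt : m / 2 < 2 ^ e := by
        have hx : m < 2 ^ e * 2 := by rw [← pow_succ]; exact hm
        exact (Nat.div_lt_iff_lt_mul (by omega)).mpr hx
      have he : 0 < e := by
        by_contra h0
        have : e = 0 := by omega
        subst this
        simp at hlt
        omega
      simp only [h, if_false, List.length_append, List.length_singleton]
      have := ih (m / 2) hlt he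
      omega

lemma binC_rev_pad :
    ∀ (e m : Nat), m < 2 ^ e → (0 < m ∨ 0 < e) →
      (binC m).reverse ++ List.replicate (e - (binC m).length) '0'
        = (List.range e).map (fun k => if m.testBit k then '1' else '0') := by
  intro e
  induction e with
  | zero => intro m hm h0; omega
  | succ e ih =>
    intro m hm _
    rw [List.range_succ_eq_map, List.map_cons, List.map_map, binC]
    by_cases h : m / 2 = 0
    · have hm2 : m = 0 ∨ m = 1 := by omega
      have htail : (List.range e).map ((fun k => if m.testBit k then '1' else '0') ∘ Nat.succ)
          = List.replicate e '0' := by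
        have : ∀ k, ((fun k => if m.testBit k then '1' else '0') ∘ Nat.succ) k = '0' := by
          intro k
          have hpow : (2:Nat) ≤ 2 ^ (k + 1) := by
            simpa using Nat.pow_le_pow_right (show 1 ≤ 2 by omega) (show 1 ≤ k + 1 by omega)
          have : m.testBit (k + 1) = false :=
            Nat.testBit_lt_two_pow (by omega)
          simp [Function.comp, this]
        rw [List.map_congr_left (fun a _ => this a), List.map_const']
        simp
      simp only [h, if_true, List.reverse_singleton, List.length_singleton,
        List.singleton_append, htail]
      have hbit0 : (if m.testBit 0 then '1' else '0') = Nat.digitChar (m % 2) := by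
        rcases hm2 with h1 | h1 <;> subst h1 <;> decide
      rw [← hbit0]
      rfl
    · have hlt : m / 2 < 2 ^ e := by
        have h2 : m < 2 ^ e * 2 := by rw [← pow_succ]; exact hm
        exact (Nat.div_lt_iff_lt_mul (show 0 < 2 by omega)).mpr h2
      have hrec := ih (m / 2) hlt (Or.inl (by omega))
      have hsucc : ∀ k, ((fun k => if m.testBit k then '1' else '0') ∘ Nat.succ) k
          = (fun k => if (m / 2).testBit k then '1' else '0') k := by
        intro k; simp [Function.comp, Nat.testBit_add_one]
      rw [List.map_congr_left (fun a _ => hsucc a)]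
      simp only [h, if_false, List.reverse_append, List.reverse_singleton,
        List.singleton_append, List.length_append, List.length_singleton]
      have hlen : e + 1 - ((binC (m / 2)).length + 1) = e - (binC (m / 2)).length := by omega
      rw [hlen, List.cons_append, hrec]
      have hbit0 : (if m.testBit 0 then '1' else '0') = Nat.digitChar (m % 2) := by
        have hm2 : m % 2 = 0 ∨ m % 2 = 1 := by omega
        rw [Nat.testBit_zero]
        rcases hm2 with h2 | h2 <;> simp [h2, Nat.digitChar]
      rw [← hbit0]

lemma binC_pad (e m : Nat) (hm : m < 2 ^ e) (he : 0 < e) :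
    List.replicate (e - (binC m).length) '0' ++ binC m
      = ((List.range e).reverse).map (fun k => if m.testBit k then '1' else '0') := by
  have h := congrArg List.reverse (binC_rev_pad e m hm (Or.inr he))
  simpa [List.reverse_append, List.reverse_replicate, List.map_reverse] using h

lemma zfill_binC (cs : List Char) (w : Nat) (hc : ∀ c ∈ cs, c = '0' ∨ c = '1')
    (hne : cs ≠ []) (hlen : cs.length ≤ w) :
    PySem.Chars.zfill cs (w : Int) = List.replicate (w - cs.length) '0' ++ cs := by
  unfold PySem.Chars.zfill
  by_cases h : (w : Int) ≤ (cs.length : Int)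
  · have : w = cs.length := by omega
    simp [this]
  · simp only [h, if_false]
    cases cs with
    | nil => exact absurd rfl hne
    | cons c rest =>
      have hcnot : ¬ (c = '+' ∨ c = '-') := by
        rcases hc c (List.mem_cons_self) with h0 | h0 <;> subst h0 <;> decide
      simp [hcnot]

lemma bit_bridge (x : Int) (nn k : Nat) (hk : k < nn) :
    ((PySem.Int.mod x (2 ^ nn)).toNat.testBit k = true)
      ↔ PySem.Int.band (PySem.Int.floordiv x (2 ^ k)) 1 ≠ 0 := by
  have h2k : (0:Int) < 2 ^ k := by positivity
  have h2n : (0:Int) < 2 ^ nn := by positivity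
  rw [PySem.Int.band_one, PySem.Int.mod_eq_emod_of_pos (show (0:Int) < 2 by norm_num),
      PySem.Int.floordiv_eq_ediv_of_pos h2k, PySem.Int.mod_eq_emod_of_pos h2n]
  have hnonneg : 0 ≤ x % 2 ^ nn := Int.emod_nonneg x (ne_of_gt h2n)
  rw [Nat.testBit_eq_decide_div_mod_eq, decide_eq_true_iff]
  have hcast : (((x % 2 ^ nn).toNat / 2 ^ k % 2 : Nat) : Int)
      = (x % 2 ^ nn) / 2 ^ k % 2 := by
    rw [Int.natCast_emod, Int.natCast_ediv, Int.toNat_of_nonneg hnonneg]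
    push_cast
    ring_nf
  have key : (x % 2 ^ nn) / 2 ^ k % 2 = x / 2 ^ k % 2 := by
    have hsplit : (2:Int) ^ nn = 2 ^ (nn - k) * 2 ^ k := by
      rw [← pow_add]
      congr 1
      omega
    have hsplit2 : (2:Int) ^ (nn - k) = 2 * 2 ^ (nn - k - 1) := by
      rw [← pow_succ']
      congr 1
      omega
    conv_lhs => rw [Int.emod_def x (2 ^ nn)]
    have hrw : x - 2 ^ nn * (x / 2 ^ nn)
        = x + (-(2 ^ (nn - k) * (x / 2 ^ nn))) * 2 ^ k := by
      rw [hsplit]; ring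
    rw [hrw, Int.add_mul_ediv_right _ _ (ne_of_gt h2k)]
    have hrw2 : x / 2 ^ k + -(2 ^ (nn - k) * (x / 2 ^ nn))
        = x / 2 ^ k + 2 * (-(2 ^ (nn - k - 1) * (x / 2 ^ nn))) := by
      rw [hsplit2]; ring
    rw [hrw2, Int.add_mul_emod_self_left]
  have h01 := Int.emod_two_eq (x / 2 ^ k)
  constructor
  · intro h
    have hInt : (((x % 2 ^ nn).toNat / 2 ^ k % 2 : Nat) : Int) = 1 := by rw [h]; rfl
    rw [hcast, key] at hInt
    omega
  · intro h
    have hx : x / 2 ^ k % 2 = 1 := by omega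
    have hInt : (((x % 2 ^ nn).toNat / 2 ^ k % 2 : Nat) : Int) = 1 := by rw [hcast, key, hx]
    exact_mod_cast hInt

lemma renderB_eq (nn : Nat) (hnn : 0 < nn) (x : Int) :
    renderB ((1:Int) <<< nn) (nn : Int) x
      = ((List.range nn).reverse).map
          (fun k => if PySem.Int.band (PySem.Int.floordiv x (2 ^ k)) 1 ≠ 0 then '#' else ' ') := by
  unfold renderB
  have hshift : (1:Int) <<< nn = 2 ^ nn := by rw [Int.shiftLeft_eq']; push_cast; ring
  have h2n : (0:Int) < 2 ^ nn := by positivity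
  have hmx0 : 0 ≤ PySem.Int.mod x (2 ^ nn) := PySem.Int.mod_nonneg x h2n
  have hmxlt : (PySem.Int.mod x (2 ^ nn)).toNat < 2 ^ nn := by
    have h1 := PySem.Int.mod_lt x h2n
    have : ((PySem.Int.mod x (2 ^ nn)).toNat : Int) < ((2 ^ nn : Nat) : Int) := by
      rw [Int.toNat_of_nonneg hmx0]; push_cast; exact h1
    exact_mod_cast this
  have hbin : PySem.Int.toBinChars (PySem.Int.mod x ((1:Int) <<< nn))
      = binC (PySem.Int.mod x (2 ^ nn)).toNat := by
    rw [hshift]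
    unfold PySem.Int.toBinChars
    rw [if_neg (by omega), toDigits_two_eq_binC]
  rw [hbin,
      zfill_binC _ nn (binC_chars _) (binC_ne_nil _)
        (binC_length_le nn _ hmxlt hnn),
      binC_pad nn _ hmxlt hnn, List.map_map]
  apply List.map_congr_left
  intro k hk
  have hklt : k < nn := by
    rw [List.mem_reverse, List.mem_range] at hk
    exact hk
  have h2k : (0:Int) < 2 ^ k := by positivity
  have hbridge : ((x % 2 ^ nn).toNat.testBit k = true)
      ↔ PySem.Int.band (x / 2 ^ k) 1 ≠ 0 := by
    rw [← PySem.Int.mod_eq_emod_of_pos h2n, ← PySem.Int.floordiv_eq_ediv_of_pos h2k]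
    exact bit_bridge x nn k hklt
  by_cases hb : PySem.Int.band (x / 2 ^ k) 1 = 0
  · have ht : (x % 2 ^ nn).toNat.testBit k = false := by
      rcases Bool.eq_false_or_eq_true ((x % 2 ^ nn).toNat.testBit k) with h | h
      · exact absurd (hbridge.mp h) (by simpa using hb)
      · exact h
    simp [Function.comp, ht, hb]
  · have ht := hbridge.mpr hb
    simp [Function.comp, ht, hb]

lemma pymax_hash (p q : Prop) [Decidable p] [Decidable q] :
    pymax (if p then '#' else ' ') (if q then '#' else ' ')
      = if p ∨ q then '#' else ' ' := by
  by_cases hp : p <;> by_cases hq : q <;> simp [pymax, hp, hq]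

lemma row_eq (nn : Nat) (hnn : 0 < nn) (a b : Int) :
    List.zipWith pymax (renderB ((1:Int) <<< nn) (nn : Int) a)
                       (renderB ((1:Int) <<< nn) (nn : Int) b)
      = ((List.range nn).reverse).map (bitChar a b) := by
  rw [renderB_eq nn hnn a, renderB_eq nn hnn b, List.zipWith_map, List.zipWith_self]
  apply List.map_congr_left
  intro k _
  unfold bitChar
  exact pymax_hash _ _

-- ===== VERDICT (by name: the statement is the Claim_ definition above) =====
theorem solution_spec : Claim_equal_solution := by
  intro n arr1 arr2 _ hpre
  unfold Spec_solution solution solution_alt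
  rcases hpre with ⟨h1, h2⟩
  by_cases hn : n ≤ 0
  · rw [PySem.List.pyRange_one_eq_nil hn, if_pos hn]
    rfl
  · rw [if_neg hn]
    obtain ⟨nn, rfl⟩ : ∃ m : Nat, n = (m : Int) := ⟨n.toNat, (Int.toNat_of_nonneg (by omega)).symm⟩
    have hnn : 0 < nn := by omega
    have hm1 : nn ≤ arr1.length := by exact_mod_cast h1
    have hm2 : nn ≤ arr2.length := by exact_mod_cast h2
    rw [PySem.List.pyRange_zero_natCast, PySem.List.foldl_append_singleton_eq_map, List.map_map,
        PySem.List.slice_to arr1 (by omega), PySem.List.slice_to arr2 (by omega)]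
    simp only [Int.toNat_natCast]
    apply List.ext_getElem
    · simp
      omega
    · intro i hi hi'
      simp only [List.nil_append, List.getElem_map, List.getElem_range, Function.comp_apply,
        List.getElem_zip, List.getElem_take]
      have hia : i < arr1.length := by simp at hi; omega
      have hib : i < arr2.length := by simp at hi; omega
      have g1 : (PySem.List.pyGet? arr1 (i : Int)).getD 0 = arr1[i] := by simp [hia]
      have g2 : (PySem.List.pyGet? arr2 (i : Int)).getD 0 = arr2[i] := by simp [hib]
      rw [g1, g2, show ("" : String) = String.ofList [] from rfl, rowA_eq, List.append_nil,
        row_eq nn hnn arr1[i] arr2[i]]
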